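-- pv_equiv track=rewrite | github.com/alexandraback/datacollection | solutions_5708284669460480_0/Python/mblumberg/problem_b.py | makes_string
-- ===== SOURCE A (Python) =====
-- def makes_string(word, num_chars):
-- 	overlap = 0
-- 	i = 0
-- 	while i < len(word):
-- 		if word[i:] == word[:(-1*i)]:
-- 			overlap = len(word) - i
-- 			i = len(word)
-- 		else:
-- 			i+=1
-- 	head = word[:overlap]
-- 	tail = word[overlap:]
-- 	result = head + tail * num_chars
-- 	result = result [:num_chars]
-- 	return result
-- ===== SOURCE B (Python) =====
-- def makes_string(word, num_chars):
--     n = len(word)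
--     if n == 0:
--         return ''
--     # KMP prefix function: pi[i] = longest proper border of word[:i+1]
--     pi = [0] * n
--     k = 0
--     for i in range(1, n):
--         while k > 0 and word[i] != word[k]:
--             k = pi[k - 1]
--         if word[i] == word[k]:
--             k += 1
--         pi[i] = k
--     b = pi[-1]                 # longest proper border of word
--     head = word[:b]
--     tail = word[b:]            # length = smallest period of word
--     # repeat tail just enough times to cover num_chars characters
--     reps = max(0, -((b - num_chars) // len(tail)))
--     return (head + tail * reps)[:num_chars]
-- ===== Notes on version B (the rewrite author's own statement) =====
-- stated objective: faster
-- what changed: B finds the longest proper border with the one-pass KMP prefix function instead of A's quadratic scan comparing word[i:] to word[:-i] for every i, and repeats the period only ceil((num_chars-border)/period) times before truncating instead of materialising tail*num_chars.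
import Mathlib
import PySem

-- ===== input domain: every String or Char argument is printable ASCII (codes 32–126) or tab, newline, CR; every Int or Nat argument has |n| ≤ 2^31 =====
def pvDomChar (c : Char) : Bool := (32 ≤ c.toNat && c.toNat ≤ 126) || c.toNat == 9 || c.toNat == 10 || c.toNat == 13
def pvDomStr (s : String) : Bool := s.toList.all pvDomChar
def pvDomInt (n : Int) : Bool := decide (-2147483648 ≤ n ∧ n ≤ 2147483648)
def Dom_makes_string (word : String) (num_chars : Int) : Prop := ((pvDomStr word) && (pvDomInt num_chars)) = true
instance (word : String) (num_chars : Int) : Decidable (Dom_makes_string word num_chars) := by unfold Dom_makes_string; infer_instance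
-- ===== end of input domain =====

-- B replaces A's quadratic suffix==prefix scan by the KMP prefix function and repeats the
-- period only ceil((num_chars-border)/period) times instead of num_chars times (objective: faster).

-- ===== PORT A =====
-- while-loop condition: word[i:] == word[:(-1*i)]
def aCond (w : List Char) (i : Int) : Bool :=
  PySem.List.slice w (some i) none == PySem.List.slice w none (some (-1 * i))

-- the while loop; state (overlap, i); setting i = len(word) exits the loop returning overlap
def aWhile (w : List Char) (overlap : Int) (i : Int) : Int :=
  if i < (w.length : Int) then
    if aCond w i then aWhile w ((w.length : Int) - i) (w.length : Int)
    else aWhile w overlap (i + 1)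
  else overlap
termination_by ((w.length : Int) - i).toNat
decreasing_by all_goals omega

def makes_string (word : String) (num_chars : Int) : String :=
  let w := word.toList
  let overlap := aWhile w 0 0
  let head := PySem.List.slice w none (some overlap)
  let tail := PySem.List.slice w (some overlap) none
  let result := head ++ PySem.List.pyRepeat tail num_chars
  String.ofList (PySem.List.slice result none (some num_chars))

-- ===== PORT B =====
-- inner `while k > 0 and word[i] != word[k]: k = pi[k-1]`; fuel = entry k (each step strictly
-- decreases k, so this fuel always suffices — a totalization guard only)
def kmpWhile (w : List Char) (pi : List Nat) (c : Char) : Nat → Nat → Nat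
  | 0, k => k
  | fuel + 1, k =>
    if 0 < k ∧ w.getD k ' ' ≠ c then kmpWhile w pi c fuel (pi.getD (k - 1) 0) else k

-- one iteration of `for i in range(1, n)`; state = (pi entries so far, k)
def kmpStep (w : List Char) (st : List Nat × Nat) (i : Nat) : List Nat × Nat :=
  let k1 := kmpWhile w st.1 (w.getD i ' ') st.2 st.2
  let k2 := if w.getD i ' ' = w.getD k1 ' ' then k1 + 1 else k1
  (st.1 ++ [k2], k2)

def makes_string_alt (word : String) (num_chars : Int) : String :=
  let w := word.toList
  let n := w.length
  if n = 0 then "" else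
    let st := (List.range' 1 (n - 1)).foldl (kmpStep w) ([0], 0)
    let b := st.1.getLastD 0            -- b = pi[-1], the longest proper border
    let head := w.take b
    let tail := w.drop b
    -- reps = max(0, -((b - num_chars) // len(tail)))  (ceiling division)
    let reps : Int := max 0 (-(PySem.Int.floordiv ((b : Int) - num_chars) ((n : Int) - (b : Int))))
    String.ofList (PySem.List.slice (head ++ PySem.List.pyRepeat tail reps) none (some num_chars))

-- ===== PRECONDITION & SPEC =====
def Spec_makes_string (word : String) (num_chars : Int) (out : String) : Prop := out = makes_string_alt word num_chars
instance (word : String) (num_chars : Int) (out : String) : Decidable (Spec_makes_string word num_chars out) := by unfold Spec_makes_string; infer_instance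

-- ===== CLAIM (what is proved, stated in full; the proofs are below) =====
def Claim_equal_makes_string : Prop := ∀ (word : String) (num_chars : Int), Dom_makes_string word num_chars → Spec_makes_string word num_chars (makes_string word num_chars)

-- ===== LEMMAS AND PROOFS =====

-- `isBord w m b` : the prefix of length b is a proper border of the prefix of length m
def isBord (w : List Char) (m b : Nat) : Bool :=
  decide (b < m) && decide (w.take b <:+ w.take m)

-- longest proper border of the prefix of length m
def lb (w : List Char) (m : Nat) : Nat :=
  @Nat.findGreatest (fun b => isBord w m b = true) (fun _ => instDecidableEqBool _ _) (m - 1)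

-- ---------- generic list facts ----------
theorem length_flatten_replicate (y : List Char) (r : Nat) :
    (List.replicate r y).flatten.length = r * y.length := by
  induction r with
  | zero => simp
  | succ r ih => simp [List.replicate_succ, ih]; ring

theorem suffix_concat_iff (u v : List Char) (a c : Char) :
    u ++ [a] <:+ v ++ [c] ↔ a = c ∧ u <:+ v := by
  constructor
  · intro h
    have h' : (a :: u.reverse) <+: (c :: v.reverse) := by
      rw [← List.reverse_suffix]; simpa using h
    rcases List.cons_prefix_cons.mp h' with ⟨h1, h2⟩
    exact ⟨h1, by rwa [List.reverse_prefix] at h2⟩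
  · rintro ⟨rfl, h⟩
    rcases h with ⟨t, rfl⟩
    exact ⟨t, by simp⟩

theorem take_succ_concat (w : List Char) (i : Nat) (h : i < w.length) :
    w.take (i+1) = w.take i ++ [w.getD i ' '] := by
  rw [List.take_succ, List.getD_eq_getElem _ _ h, List.getElem?_eq_getElem h]
  simp

-- a border extends by one character iff the next characters match
theorem bord_extend (w : List Char) (b i : Nat) (hb : b ≤ i) (hi : i < w.length) :
    (w.take (b+1) <:+ w.take (i+1)) ↔ (w.take b <:+ w.take i ∧ w.getD b ' ' = w.getD i ' ') := by
  rw [take_succ_concat w i hi, take_succ_concat w b (lt_of_le_of_lt hb hi), suffix_concat_iff]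
  tauto

-- two borders of the same prefix are comparable
theorem bord_of_bord_le (w : List Char) (b k i : Nat)
    (hbi : w.take b <:+ w.take i) (hki : w.take k <:+ w.take i) (hbk : b ≤ k) :
    w.take b <:+ w.take k := by
  apply List.suffix_of_suffix_length_le hbi hki
  simp only [List.length_take]
  omega

-- ---------- lb (longest proper border of the prefix of length m) ----------
theorem isBord_iff (w : List Char) (m b : Nat) :
    isBord w m b = true ↔ b < m ∧ w.take b <:+ w.take m := by
  simp [isBord]

theorem isBord_zero (w : List Char) (m : Nat) (h : 0 < m) : isBord w m 0 = true := by
  simp [isBord, h]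

theorem lb_le (w : List Char) (m : Nat) : lb w m ≤ m - 1 :=
  @Nat.findGreatest_le (fun b => isBord w m b = true) (fun _ => instDecidableEqBool _ _) (m - 1)

theorem lb_spec (w : List Char) (m : Nat) (h : 1 ≤ m) : isBord w m (lb w m) = true := by
  exact @Nat.findGreatest_spec 0 (fun b => isBord w m b = true)
    (fun _ => instDecidableEqBool _ _) (m - 1) (Nat.zero_le _) (isBord_zero w m h)

theorem lb_greatest (w : List Char) (m b : Nat) (h : isBord w m b = true) : b ≤ lb w m := by
  by_contra hlt
  push_neg at hlt
  have hb : b ≤ m - 1 := by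
    rcases (isBord_iff w m b).mp h with ⟨h1, _⟩; omega
  exact absurd h (@Nat.findGreatest_is_greatest b (fun b => isBord w m b = true)
    (fun _ => instDecidableEqBool _ _) (m - 1) hlt hb)

-- ---------- the inner while loop ----------
theorem kmpWhile_spec (w : List Char) (i : Nat) (pi : List Nat) (c : Char)
    (hi : 1 ≤ i) (hin : i ≤ w.length)
    (hpi : ∀ t, t < i → pi.getD t 0 = lb w (t+1)) :
    ∀ fuel k, k ≤ fuel → k < i → w.take k <:+ w.take i →
      (kmpWhile w pi c fuel k < i) ∧
      (w.take (kmpWhile w pi c fuel k) <:+ w.take i) ∧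
      (0 < kmpWhile w pi c fuel k → w.getD (kmpWhile w pi c fuel k) ' ' = c) ∧
      (∀ b, b ≤ k → w.take b <:+ w.take i → w.getD b ' ' = c → b ≤ kmpWhile w pi c fuel k) := by
  intro fuel
  induction fuel with
  | zero =>
    intro k hk hki hQ
    have : k = 0 := by omega
    subst this
    simp only [kmpWhile]
    refine ⟨by omega, by simpa using hQ, by omega, ?_⟩
    intro b hb _ _; omega
  | succ fuel ih =>
    intro k hk hki hQ
    by_cases hc : 0 < k ∧ w.getD k ' ' ≠ c
    · rw [kmpWhile, if_pos hc]
      have hpik : pi.getD (k - 1) 0 = lb w k := by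
        have := hpi (k - 1) (by omega)
        rwa [Nat.sub_add_cancel hc.1] at this
      rw [hpik]
      have hlbk : lb w k ≤ k - 1 := lb_le w k
      have hQk : w.take (lb w k) <:+ w.take k :=
        ((isBord_iff w k (lb w k)).mp (lb_spec w k hc.1)).2
      have hQi : w.take (lb w k) <:+ w.take i := hQk.trans hQ
      have hmain := ih (lb w k) (by omega) (by omega) hQi
      refine ⟨hmain.1, hmain.2.1, hmain.2.2.1, ?_⟩
      intro b hb hbord hchar
      have hbk : b < k := by
        rcases Nat.lt_or_ge b k with h' | h'
        · exact h'
        · exfalso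
          have : b = k := by omega
          subst this
          exact hc.2 hchar
      have : b ≤ lb w k :=
        lb_greatest w k b ((isBord_iff w k b).mpr ⟨hbk, bord_of_bord_le w b k i hbord hQ (by omega)⟩)
      exact hmain.2.2.2 b this hbord hchar
    · rw [kmpWhile, if_neg hc]
      push_neg at hc
      refine ⟨hki, hQ, fun h0 => hc h0, ?_⟩
      intro b hb _ _; exact hb

-- ---------- one outer step computes lb (i+1) ----------
theorem kmpStep_spec (w : List Char) (pi : List Nat) (i : Nat)
    (hi : 1 ≤ i) (hin : i < w.length)
    (hpi : ∀ t, t < i → pi.getD t 0 = lb w (t+1)) :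
    kmpStep w (pi, lb w i) i = (pi ++ [lb w (i+1)], lb w (i+1)) := by
  have hki : lb w i < i := by have := lb_le w i; omega
  have hQ : w.take (lb w i) <:+ w.take i :=
    ((isBord_iff w i (lb w i)).mp (lb_spec w i hi)).2
  have hmain := kmpWhile_spec w i pi (w.getD i ' ') hi (le_of_lt hin) hpi
      (lb w i) (lb w i) le_rfl hki hQ
  set k1 := kmpWhile w pi (w.getD i ' ') (lb w i) (lb w i) with hk1
  obtain ⟨hk1i, hk1Q, hk1exit, hk1max⟩ := hmain
  have hstep : (if w.getD i ' ' = w.getD k1 ' ' then k1 + 1 else k1) = lb w (i+1) := by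
    by_cases hceq : w.getD i ' ' = w.getD k1 ' '
    · rw [if_pos hceq]
      have hext : w.take (k1+1) <:+ w.take (i+1) :=
        (bord_extend w k1 i (by omega) hin).mpr ⟨hk1Q, hceq.symm⟩
      have hle : k1 + 1 ≤ lb w (i+1) :=
        lb_greatest w (i+1) (k1+1) ((isBord_iff w (i+1) (k1+1)).mpr ⟨by omega, hext⟩)
      have hge : lb w (i+1) ≤ k1 + 1 := by
        by_contra hgt
        push_neg at hgt
        obtain ⟨hL1, hL2⟩ := (isBord_iff w (i+1) (lb w (i+1))).mp (lb_spec w (i+1) (by omega))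
        obtain ⟨b, hb⟩ : ∃ b, lb w (i+1) = b + 1 := ⟨lb w (i+1) - 1, by omega⟩
        rw [hb] at hL1 hL2 hgt
        obtain ⟨hb1, hb2⟩ := (bord_extend w b i (by omega) hin).mp hL2
        have hblb : b ≤ lb w i :=
          lb_greatest w i b ((isBord_iff w i b).mpr ⟨by omega, hb1⟩)
        have := hk1max b hblb hb1 hb2
        omega
      omega
    · rw [if_neg hceq]
      have hk10 : k1 = 0 := by
        by_contra h0
        exact hceq (hk1exit (by omega)).symm
      have hlb0 : lb w (i+1) = 0 := by
        by_contra h0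
        obtain ⟨hL1, hL2⟩ := (isBord_iff w (i+1) (lb w (i+1))).mp (lb_spec w (i+1) (by omega))
        obtain ⟨b, hb⟩ : ∃ b, lb w (i+1) = b + 1 := ⟨lb w (i+1) - 1, by omega⟩
        rw [hb] at hL1 hL2
        obtain ⟨hb1, hb2⟩ := (bord_extend w b i (by omega) hin).mp hL2
        have hblb : b ≤ lb w i :=
          lb_greatest w i b ((isBord_iff w i b).mpr ⟨by omega, hb1⟩)
        have hbk1 := hk1max b hblb hb1 hb2
        have hb0 : b = 0 := by omega
        rw [hb0] at hb2
        rw [hk10] at hceq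
        exact hceq hb2.symm
      rw [hk10, hlb0]
  simp only [kmpStep, ← hk1, hstep]

-- ---------- the fold computes the whole prefix-function table ----------
theorem kmpFold (w : List Char) (j : Nat) (hj : j ≤ w.length - 1) (hw : 1 ≤ w.length) :
    (List.range' 1 j).foldl (kmpStep w) ([0], 0) =
      ((List.range (j+1)).map (fun t => lb w (t+1)), lb w (j+1)) := by
  induction j with
  | zero =>
    have h1 : lb w 1 = 0 := by simp [lb, Nat.findGreatest_zero]
    simp [h1, List.range_one]
  | succ j ih =>
    have hrec := ih (by omega)
    have hrange : List.range' 1 (j+1) = List.range' 1 j ++ [1 + j] := by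
      simpa using List.range'_concat (s := 1) (n := j) (step := 1)
    rw [hrange, List.foldl_append, hrec]
    simp only [List.foldl_cons, List.foldl_nil]
    have h1j : 1 + j = j + 1 := by omega
    rw [h1j]
    have hpi : ∀ t, t < j + 1 → ((List.range (j+1)).map (fun t => lb w (t+1))).getD t 0 = lb w (t+1) := by
      intro t ht
      exact PySem.List.getD_map_range (fun t => lb w (t+1)) (j+1) t 0 ht
    have := kmpStep_spec w ((List.range (j+1)).map (fun t => lb w (t+1))) (j+1)
      (by omega) (by omega) hpi
    rw [this]
    simp [List.range_succ]

-- ---------- the A-side while loop ----------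
theorem aCond_zero (w : List Char) (hw : w ≠ []) : aCond w 0 = false := by
  simp only [aCond]
  norm_num
  rw [PySem.List.slice_to w (by norm_num : (0:Int) ≤ 0)]
  simp [hw]

theorem aCond_pos_iff (w : List Char) (j : Nat) (h1 : 1 ≤ j) (h2 : j < w.length) :
    aCond w (j : Int) = true ↔ w.take (w.length - j) <:+ w := by
  have hfrom : PySem.List.slice w (some (j : Int)) none = w.drop j :=
    PySem.List.slice_from_natCast w j
  have hto : PySem.List.slice w none (some (-1 * (j : Int))) = w.take (w.length - j) := by
    have : (-1 * (j : Int)) = -(j : Int) := by ring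
    rw [this]
    exact PySem.List.slice_to_neg_natCast w j h1
  simp only [aCond, hfrom, hto, beq_iff_eq]
  constructor
  · intro he; rw [← he]; exact List.drop_suffix j w
  · intro hs
    have hd : w.drop j <:+ w := List.drop_suffix j w
    have hlen : (w.take (w.length - j)).length = (w.drop j).length := by
      simp
    exact ((List.suffix_of_suffix_length_le hs hd (by omega)).eq_of_length hlen).symm
theorem aCond_isBord (w : List Char) (j : Nat) (h1 : 1 ≤ j) (h2 : j < w.length)
    (hc : aCond w (j : Int) = true) : isBord w w.length (w.length - j) = true := by
  rw [isBord_iff]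
  refine ⟨by omega, ?_⟩
  rw [List.take_length]
  exact (aCond_pos_iff w j h1 h2).mp hc

theorem aWhile_not_found (w : List Char) (ov : Int) :
    ∀ d i : Nat, w.length - i ≤ d →
      (∀ j : Nat, i ≤ j → j < w.length → aCond w (j : Int) = false) →
      aWhile w ov (i : Int) = ov := by
  intro d
  induction d with
  | zero =>
    intro i hd _
    rw [aWhile, if_neg (by push_cast; omega)]
  | succ d ih =>
    intro i hd h
    by_cases hin : i < w.length
    · rw [aWhile, if_pos (by push_cast; omega), if_neg (by simp [h i le_rfl hin])]
      have hcast : ((i : Nat) : Int) + 1 = ((i + 1 : Nat) : Int) := by push_cast; ring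
      rw [hcast]
      exact ih (i + 1) (by omega) (fun j hj hjn => h j (by omega) hjn)
    · rw [aWhile, if_neg (by push_cast; omega)]

theorem aWhile_hit (w : List Char) (ov : Int) (i : Nat) (hin : i < w.length)
    (hC : aCond w (i : Int) = true) : aWhile w ov (i : Int) = (w.length : Int) - i := by
  rw [aWhile, if_pos (by push_cast; omega), if_pos hC]
  rw [aWhile, if_neg (lt_irrefl _)]

theorem aWhile_found (w : List Char) (ov : Int) :
    ∀ d i j0 : Nat, j0 - i ≤ d → i ≤ j0 → j0 < w.length → aCond w (j0 : Int) = true →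
      (∀ j : Nat, i ≤ j → j < j0 → aCond w (j : Int) = false) →
      aWhile w ov (i : Int) = (w.length : Int) - j0 := by
  intro d
  induction d with
  | zero =>
    intro i j0 hd hij hj0 hC _
    have : i = j0 := by omega
    subst this
    exact aWhile_hit w ov i hj0 hC
  | succ d ih =>
    intro i j0 hd hij hj0 hC hmin
    by_cases heq : i = j0
    · subst heq
      exact aWhile_hit w ov i hj0 hC
    · rw [aWhile, if_pos (by push_cast; omega),
        if_neg (by simp [hmin i le_rfl (by omega)])]
      have hcast : ((i : Nat) : Int) + 1 = ((i + 1 : Nat) : Int) := by push_cast; ring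
      rw [hcast]
      exact ih (i + 1) j0 (by omega) (by omega) hj0 hC (fun j hj hjn => hmin j (by omega) hjn)

-- A's while loop computes the longest proper border
theorem aWhile_eq_lb (w : List Char) (hw : w ≠ []) :
    aWhile w 0 0 = (lb w w.length : Int) := by
  have hn : 0 < w.length := by cases w with | nil => simp at hw | cons a t => simp
  by_cases hL : lb w w.length = 0
  · have h0 : ∀ j : Nat, 0 ≤ j → j < w.length → aCond w (j : Int) = false := by
      intro j _ hj
      rcases Nat.eq_zero_or_pos j with rfl | hj1
      · exact aCond_zero w hw
      · by_contra hc
        rw [Bool.not_eq_false] at hc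
        have := lb_greatest w w.length (w.length - j) (aCond_isBord w j hj1 hj hc)
        omega
    have := aWhile_not_found w 0 w.length 0 (by omega) h0
    rw [hL]
    simpa using this
  · have hL1 : 1 ≤ lb w w.length := by omega
    have hLlt : lb w w.length < w.length := by have := lb_le w w.length; omega
    have hC : aCond w ((w.length - lb w w.length : Nat) : Int) = true := by
      rw [aCond_pos_iff w _ (by omega) (by omega)]
      have hb := (isBord_iff w w.length (lb w w.length)).mp (lb_spec w w.length (by omega))
      have hnl : w.length - (w.length - lb w w.length) = lb w w.length := by omega
      rw [hnl]
      have := hb.2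
      rwa [List.take_length] at this
    have hmin : ∀ j : Nat, 0 ≤ j → j < w.length - lb w w.length → aCond w (j : Int) = false := by
      intro j _ hj
      rcases Nat.eq_zero_or_pos j with rfl | hj1
      · exact aCond_zero w hw
      · by_contra hc
        rw [Bool.not_eq_false] at hc
        have := lb_greatest w w.length (w.length - j) (aCond_isBord w j hj1 (by omega) hc)
        omega
    have := aWhile_found w 0 (w.length - lb w w.length) 0 (w.length - lb w w.length)
      (by omega) (by omega) (by omega) hC hmin
    rw [show ((0:Nat) : Int) = (0 : Int) by norm_num] at this
    rw [this]
    push_cast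
    omega

-- truncating a long repetition equals truncating a just-long-enough one
theorem take_append_flatten_replicate (x y : List Char) (t r s : Nat)
    (ht : t ≤ x.length + r * y.length) (hrs : r ≤ s) :
    (x ++ (List.replicate s y).flatten).take t = (x ++ (List.replicate r y).flatten).take t := by
  have hsplit : List.replicate s y = List.replicate r y ++ List.replicate (s - r) y := by
    rw [← List.replicate_add]
    congr 1
    omega
  rw [hsplit, List.flatten_append, ← List.append_assoc]
  rw [List.take_append_of_le_length
    (by rw [List.length_append, length_flatten_replicate]; omega)]

theorem makes_string_key : ∀ (word : String) (num_chars : Int),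
    makes_string word num_chars = makes_string_alt word num_chars := by
  intro word num_chars
  simp only [makes_string, makes_string_alt]
  set w := word.toList with hwdef
  by_cases hw : w = []
  · rw [hw]
    rw [aWhile]
    norm_num
    simp [PySem.List.slice, PySem.List.pyRepeat, PySem.List.clampIdx]
  · have hn : 0 < w.length := List.length_pos_of_ne_nil hw
    rw [if_neg (by omega)]
    rw [kmpFold w (w.length - 1) le_rfl (by omega)]
    have hlast : ((List.range (w.length - 1 + 1)).map (fun t => lb w (t+1))).getLastD 0
        = lb w w.length := by
      obtain ⟨m, hm⟩ : ∃ m, w.length = m + 1 := ⟨w.length - 1, by omega⟩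
      rw [show w.length - 1 + 1 = m + 1 by omega, List.range_succ, List.map_append]
      simp only [List.map_cons, List.map_nil]
      rw [List.getLastD_concat, ← hm]
    rw [hlast, aWhile_eq_lb w hw]
    set L := lb w w.length with hLdef
    have hLlt : L < w.length := by have := lb_le w w.length; omega
    rw [PySem.List.slice_to_natCast w L, PySem.List.slice_from_natCast w L]
    congr 1
    set p : Int := (w.length : Int) - (L : Int) with hpdef
    have hp : 0 < p := by rw [hpdef]; push_cast; omega
    have hfdnn : ∀ a : Int, 0 ≤ a → 0 ≤ PySem.Int.floordiv a p := by
      intro a ha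
      rw [PySem.Int.floordiv_eq_ediv_of_pos hp]
      exact Int.ediv_nonneg ha (le_of_lt hp)
    by_cases hnc : num_chars ≤ 0
    · have e1 : PySem.List.pyRepeat (w.drop L) num_chars = [] := by
        simp [PySem.List.pyRepeat, Int.toNat_of_nonpos hnc]
      have e2 : max 0 (-(PySem.Int.floordiv ((L : Int) - num_chars) p)) = 0 := by
        have hq := hfdnn ((L : Int) - num_chars) (by omega)
        omega
      rw [e1, e2]
      simp [PySem.List.pyRepeat]
    · push_neg at hnc
      rw [PySem.List.slice_to _ (le_of_lt hnc), PySem.List.slice_to _ (le_of_lt hnc)]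
      simp only [PySem.List.pyRepeat]
      have hxlen : (w.take L).length = L := by simp; omega
      have hylen : (w.drop L).length = w.length - L := by simp
      by_cases hLn : num_chars ≤ (L : Int)
      · have e2 : max 0 (-(PySem.Int.floordiv ((L : Int) - num_chars) p)) = 0 := by
          have hq := hfdnn ((L : Int) - num_chars) (by omega)
          omega
        rw [e2]
        apply take_append_flatten_replicate
        · show num_chars.toNat ≤ (w.take L).length + 0 * (w.drop L).length
          rw [hxlen]
          omega
        · omega
      · push_neg at hLn
        set q := -(PySem.Int.floordiv ((L : Int) - num_chars) p) with hqdef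
        have hq : ((q - 1) * p < num_chars - (L : Int)) ∧ (num_chars - (L : Int) ≤ q * p) := by
          apply (PySem.Int.neg_floordiv_neg_eq_iff_of_pos
            (a := num_chars - (L : Int)) (b := p) (q := q) hp).mp
          rw [hqdef]
          congr 2
          ring
        have hq1 : 1 ≤ q := by nlinarith [hq.2]
        have hmax : max 0 q = q := max_eq_right (by omega)
        rw [hmax]
        apply take_append_flatten_replicate
        · rw [hxlen, hylen]
          have hcast : (q.toNat : Int) * ((w.length - L : Nat) : Int) = q * p := by
            rw [Int.toNat_of_nonneg (by omega), Nat.cast_sub (le_of_lt hLlt)]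
          have hint : (num_chars.toNat : Int) ≤ (L : Int) + (q.toNat : Int) * ((w.length - L : Nat) : Int) := by
            rw [hcast, Int.toNat_of_nonneg (le_of_lt hnc)]
            have := hq.2
            omega
          exact_mod_cast hint
        · have hqle : q ≤ num_chars := by nlinarith [hq.1]
          omega

-- ===== VERDICT (by name: the statement is the Claim_ definition above) =====
theorem makes_string_spec : Claim_equal_makes_string := by
  intro word num_chars _
  exact makes_string_key word num_chars
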